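-- pv_equiv track=rewrite | github.com/threeML/threeML | threeML/io/plotting/light_curve_plots.py | slice_disjoint
-- ===== SOURCE A (Python) =====
-- from builtins import range
--
-- def slice_disjoint(arr):
--     """
--     Returns an array of disjoint indices from a bool array
--
--     :param arr: and array of bools
--
--
--     """
--
--     slices = []
--     start_slice = arr[0]
--     counter = 0
--     for i in range(len(arr) - 1):
--         if arr[i + 1] > arr[i] + 1:
--             end_slice = arr[i]
--             slices.append([start_slice, end_slice])
--             start_slice = arr[i + 1]
--             counter += 1
--     if counter == 0:
--         return [[arr[0], arr[-1]]]
--     if end_slice != arr[-1]: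
--         slices.append([start_slice, arr[-1]])
--     return slices
-- ===== SOURCE B (Python) =====
-- def slice_disjoint(arr):
--     # Breakpoint-first decomposition: collect cut indices once, then build the
--     # intervals from boundary lists instead of threading loop state.
--     bps = [i for i in range(len(arr) - 1) if arr[i + 1] > arr[i] + 1]
--     if not bps:
--         return [[arr[0], arr[-1]]]
--     starts = [arr[0]] + [arr[b + 1] for b in bps]
--     ends = [arr[b] for b in bps]
--     out = [[s, e] for s, e in zip(starts, ends)]
--     if ends[-1] != arr[-1]:
--         out.append([starts[-1], arr[-1]])
--     return out
-- ===== Notes on version B (the rewrite author's own statement) =====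
-- stated objective: alternative
-- what changed: Replaces A's single stateful loop (threading start_slice/end_slice/counter through each iteration) by a breakpoint-first decomposition: one scan collects the cut indices, then start/end boundary lists are zipped into the intervals.
import Mathlib
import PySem

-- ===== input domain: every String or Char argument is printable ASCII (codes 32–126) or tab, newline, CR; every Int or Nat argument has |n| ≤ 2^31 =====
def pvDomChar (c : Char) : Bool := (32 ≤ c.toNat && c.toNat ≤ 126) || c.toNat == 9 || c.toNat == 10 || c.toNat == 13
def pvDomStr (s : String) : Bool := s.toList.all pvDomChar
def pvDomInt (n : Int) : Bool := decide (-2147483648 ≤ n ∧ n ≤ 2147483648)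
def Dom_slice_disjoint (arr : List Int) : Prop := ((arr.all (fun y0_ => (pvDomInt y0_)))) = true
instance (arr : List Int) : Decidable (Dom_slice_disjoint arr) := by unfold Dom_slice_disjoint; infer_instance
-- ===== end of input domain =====

-- B is an alternative decomposition (breakpoints first, then boundary lists); equivalence is on the return value.

-- shared indexing helper: arr[i]; under Pre_ every index used is in range so the default 0 is unreachable
def sdGet (arr : List Int) (i : Int) : Int := (PySem.List.pyGet? arr i).getD 0

-- A's loop body: state (slices, start_slice, end_slice, counter); end_slice is unbound (none)
-- before the first breakpoint and is only read after the loop when counter ≠ 0.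
def sdStep (g : Int → Int) (s : List (List Int) × Int × Option Int × Int) (i : Int) :
    List (List Int) × Int × Option Int × Int :=
  if g (i + 1) > g i + 1 then
    (s.1 ++ [[s.2.1, g i]], g (i + 1), some (g i), s.2.2.2 + 1)
  else s

-- ===== PORT A =====
def slice_disjoint (arr : List Int) : List (List Int) :=
  let g := sdGet arr
  let st := (PySem.List.pyRange 0 ((arr.length : Int) - 1) 1).foldl (sdStep g) ([], g 0, none, 0)
  if st.2.2.2 = 0 then [[g 0, g (-1)]]
  else match st.2.2.1 with
    | some e => if e ≠ g (-1) then st.1 ++ [[st.2.1, g (-1)]] else st.1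
    | none => st.1   -- unreachable: counter ≠ 0 forces end_slice bound

-- ===== PORT B =====
def slice_disjoint_alt (arr : List Int) : List (List Int) :=
  let g := sdGet arr
  let bps := (PySem.List.pyRange 0 ((arr.length : Int) - 1) 1).filter (fun i => g (i + 1) > g i + 1)
  if bps = [] then [[g 0, g (-1)]]
  else
    let starts := g 0 :: bps.map (fun b => g (b + 1))
    let ends := bps.map g
    let out := (starts.zip ends).map (fun q => [q.1, q.2])
    -- ends[-1] / starts[-1] on nonempty lists = getLastD (default unreachable)
    if ends.getLastD 0 ≠ g (-1) then out ++ [[starts.getLastD 0, g (-1)]] else out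

-- ===== PRECONDITION & SPEC =====
-- A raises IndexError on the empty list (arr[0]); excluded.
def Pre_slice_disjoint (arr : List Int) : Prop := arr ≠ []
instance (arr : List Int) : Decidable (Pre_slice_disjoint arr) := by unfold Pre_slice_disjoint; infer_instance
def pvWitness_slice_disjoint : List Int := [0, 1, 5, 6, 7, 12]

def Spec_slice_disjoint (arr : List Int) (out : List (List Int)) : Prop := out = slice_disjoint_alt arr
instance (arr : List Int) (out : List (List Int)) : Decidable (Spec_slice_disjoint arr out) := by unfold Spec_slice_disjoint; infer_instance

-- ===== CLAIM (what is proved, stated in full; the proofs are below) =====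
def Claim_equal_slice_disjoint : Prop := ∀ (arr : List Int), Dom_slice_disjoint arr → Pre_slice_disjoint arr → Spec_slice_disjoint arr (slice_disjoint arr)

-- ===== LEMMAS AND PROOFS =====

-- zip of a one-longer list with a snoc picks off the last start
lemma zip_snoc (xs ys : List Int) (a b : Int) (h : xs.length = ys.length + 1) :
    (xs ++ [a]).zip (ys ++ [b]) = xs.zip ys ++ [(xs.getLastD 0, b)] := by
  induction xs generalizing ys with
  | nil => simp at h
  | cons x xs ih =>
    cases ys with
    | nil =>
      have : xs = [] := by simpa using h
      subst this; simp
    | cons y ys =>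
      have h' : xs.length = ys.length + 1 := by simpa using h
      have hxs : xs ≠ [] := by intro hn; simp [hn] at h'
      obtain ⟨z, zs, rfl⟩ := List.exists_cons_of_ne_nil hxs
      have ih' := ih ys h'
      rw [List.getLastD_eq_getLast?] at ih'
      simp only [List.cons_append, List.zip_cons_cons, List.getLastD_eq_getLast?,
        List.getLast?_cons_cons]
      simp only [List.cons_inj_right]
      exact ih'

-- loop invariant: A's fold over any index list equals B's boundary-list data
lemma sd_inv (g : Int → Int) (s0 : Int) (L : List Int) :
    L.foldl (sdStep g) ([], s0, none, 0) =
      (((s0 :: (L.filter (fun i => g (i + 1) > g i + 1)).map (fun b => g (b + 1))).zip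
          ((L.filter (fun i => g (i + 1) > g i + 1)).map g)).map (fun q => [q.1, q.2]),
       (s0 :: (L.filter (fun i => g (i + 1) > g i + 1)).map (fun b => g (b + 1))).getLastD 0,
       ((L.filter (fun i => g (i + 1) > g i + 1)).map g).getLast?,
       ((L.filter (fun i => g (i + 1) > g i + 1)).length : Int)) := by
  induction L using List.reverseRecOn with
  | nil => simp
  | append_singleton L i ih =>
    set p : Int → Bool := fun i => decide (g (i + 1) > g i + 1) with hp
    by_cases hc : g (i + 1) > g i + 1
    · simp only [List.foldl_append, List.foldl_cons, List.foldl_nil, ih,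
        List.filter_append, List.filter_cons, List.filter_nil, hp, hc, decide_true,
        if_true, List.map_append, List.map_cons, List.map_nil]
      simp only [sdStep, if_pos hc]
      rw [← List.cons_append, zip_snoc _ _ _ _ (by simp), List.getLastD_concat,
        List.getLast?_concat, List.map_append]
      simp only [List.map_cons, List.map_nil, List.length_append, List.length_cons]
      push_cast
      simp
    · simp only [List.foldl_append, List.foldl_cons, List.foldl_nil, ih,
        List.filter_append, List.filter_cons, List.filter_nil, hp, hc, decide_false]
      simp [sdStep, hc]

-- ===== VERDICT (by name: the statement is the Claim_ definition above) =====
theorem slice_disjoint_spec : Claim_equal_slice_disjoint := by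
  intro arr _ _
  unfold Spec_slice_disjoint
  simp only [slice_disjoint, slice_disjoint_alt, sd_inv]
  set g := sdGet arr with hg
  set F := (PySem.List.pyRange 0 ((arr.length : Int) - 1) 1).filter
      (fun i => decide (g (i + 1) > g i + 1)) with hF
  by_cases h0 : F = []
  · simp [h0]
  · have hlen : ¬ ((F.length : Int) = 0) := by
      simpa [Int.natCast_eq_zero, List.length_eq_zero_iff] using h0
    obtain ⟨e, he⟩ : ∃ e, (F.map g).getLast? = some e := by
      rcases List.exists_cons_of_ne_nil h0 with ⟨x, xs, hx⟩
      exact ⟨_, (F.map g).getLast?_eq_some_getLast (by simp [hx])⟩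
    have hD : (F.map g).getLastD 0 = e := by
      simp [List.getLastD_eq_getLast?, he]
    simp only [hlen, if_false, h0, he, hD]
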